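-- pv_equiv track=rewrite | github.com/AnzhelikaKoldaeva/Single-cell-tracking-algorithm | utils/read_files.py | ME_edq
-- ===== SOURCE A (Python) =====
-- def ME_edq(mch_edg_j,mch_edg_j_pl_1, R):
--     a = []
--     for i in range(len(mch_edg_j)):
--         a.append(mch_edg_j[i][1])
--     b = []
--     for j in range(len(mch_edg_j_pl_1)):
--         b.append(mch_edg_j_pl_1[j][1])
--     count = 0
--     for ai in a:
--         for bi in b:
--             if((ai,bi) in R):
--                 count = count+1
--     return count
-- ===== SOURCE B (Python) =====
-- def ME_edq(mch_edg_j, mch_edg_j_pl_1, R):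
--     ca = {}
--     for p in mch_edg_j:
--         ca[p[1]] = ca.get(p[1], 0) + 1
--     cb = {}
--     for q in mch_edg_j_pl_1:
--         cb[q[1]] = cb.get(q[1], 0) + 1
--     total = 0
--     for (x, y) in set(R):
--         total += ca.get(x, 0) * cb.get(y, 0)
--     return total
-- ===== Notes on version B (the rewrite author's own statement) =====
-- stated objective: faster
-- what changed: Replaced the O(|a|*|b|) double loop with linear membership tests by two count dictionaries of second coordinates and a single pass over the distinct pairs of R, summing ca[x]*cb[y].
import Mathlib
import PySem

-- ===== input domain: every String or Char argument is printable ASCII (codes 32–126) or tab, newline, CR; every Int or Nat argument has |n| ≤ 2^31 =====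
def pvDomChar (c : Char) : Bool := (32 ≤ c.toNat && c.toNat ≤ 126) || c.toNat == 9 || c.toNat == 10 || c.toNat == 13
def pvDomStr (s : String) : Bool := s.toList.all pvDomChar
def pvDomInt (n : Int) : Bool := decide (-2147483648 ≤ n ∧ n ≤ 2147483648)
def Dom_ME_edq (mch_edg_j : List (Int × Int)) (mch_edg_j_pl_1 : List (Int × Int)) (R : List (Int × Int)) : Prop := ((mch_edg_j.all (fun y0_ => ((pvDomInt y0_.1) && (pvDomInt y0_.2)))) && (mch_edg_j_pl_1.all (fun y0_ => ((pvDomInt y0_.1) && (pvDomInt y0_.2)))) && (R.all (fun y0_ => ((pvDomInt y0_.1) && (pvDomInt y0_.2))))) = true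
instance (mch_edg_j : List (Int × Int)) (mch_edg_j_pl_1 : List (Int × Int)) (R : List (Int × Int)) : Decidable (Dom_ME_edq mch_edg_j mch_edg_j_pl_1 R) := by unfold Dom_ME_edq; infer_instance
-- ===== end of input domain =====

-- B replaces A's nested membership loop by two count dictionaries and one pass over set(R): asymptotically faster.


-- ===== PORT A =====
def ME_edq (mch_edg_j : List (Int × Int)) (mch_edg_j_pl_1 : List (Int × Int)) (R : List (Int × Int)) : Int :=
  let a := (PySem.List.pyRange 0 (PySem.List.len mch_edg_j)).foldl
    (fun acc i => acc ++ [(PySem.List.pyGetD mch_edg_j i (0, 0)).2]) []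
  let b := (PySem.List.pyRange 0 (PySem.List.len mch_edg_j_pl_1)).foldl
    (fun acc j => acc ++ [(PySem.List.pyGetD mch_edg_j_pl_1 j (0, 0)).2]) []
  a.foldl (fun count ai =>
    b.foldl (fun count bi => if (ai, bi) ∈ R then count + 1 else count) count) 0

-- ===== PORT B =====
def ME_edq_alt (mch_edg_j : List (Int × Int)) (mch_edg_j_pl_1 : List (Int × Int)) (R : List (Int × Int)) : Int :=
  let ca := mch_edg_j.foldl (fun d p => d.insert p.2 (d.getD p.2 0 + 1)) PySem.Dict.empty
  let cb := mch_edg_j_pl_1.foldl (fun d q => d.insert q.2 (d.getD q.2 0 + 1)) PySem.Dict.empty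
  (PySem.Set.ofList R).foldl (fun total p => total + ca.getD p.1 0 * cb.getD p.2 0) 0

-- ===== PRECONDITION & SPEC =====
def Spec_ME_edq (mch_edg_j : List (Int × Int)) (mch_edg_j_pl_1 : List (Int × Int)) (R : List (Int × Int)) (out : Int) : Prop := out = ME_edq_alt mch_edg_j mch_edg_j_pl_1 R
instance (mch_edg_j : List (Int × Int)) (mch_edg_j_pl_1 : List (Int × Int)) (R : List (Int × Int)) (out : Int) : Decidable (Spec_ME_edq mch_edg_j mch_edg_j_pl_1 R out) := by unfold Spec_ME_edq; infer_instance

-- ===== CLAIM (what is proved, stated in full; the proofs are below) =====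
def Claim_equal_ME_edq : Prop := ∀ (mch_edg_j : List (Int × Int)) (mch_edg_j_pl_1 : List (Int × Int)) (R : List (Int × Int)), Dom_ME_edq mch_edg_j mch_edg_j_pl_1 R → Spec_ME_edq mch_edg_j mch_edg_j_pl_1 R (ME_edq mch_edg_j mch_edg_j_pl_1 R)

-- ===== LEMMAS AND PROOFS =====

-- counting the bi with (ai,bi) = p is count p.2 when ai = p.1, else 0
lemma countP_eq_pair (ai : Int) (b : List Int) (p : Int × Int) :
    b.countP (fun bi => decide ((ai, bi) = p)) = if ai = p.1 then b.count p.2 else 0 := by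
  by_cases h : ai = p.1
  · rw [if_pos h, List.count_eq_countP]
    apply List.countP_congr
    intro bi _
    simp [Prod.ext_iff, h]
  · rw [if_neg h]
    rw [List.countP_eq_zero]
    intro bi _
    simp [Prod.ext_iff, h]

-- a fresh head splits the membership count
lemma countP_mem_cons (ai : Int) (b : List Int) (p : Int × Int) (S : List (Int × Int))
    (hp : p ∉ S) :
    b.countP (fun bi => decide ((ai, bi) ∈ p :: S))
      = b.countP (fun bi => decide ((ai, bi) = p)) + b.countP (fun bi => decide ((ai, bi) ∈ S)) := by
  induction b with
  | nil => simp
  | cons x t ih =>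
    simp only [List.countP_cons, ih]
    by_cases h1 : (ai, x) = p <;> by_cases h2 : (ai, x) ∈ S <;>
      simp_all [List.mem_cons] <;> omega

lemma sum_map_ite_count (a : List Int) (v c : Int) :
    (a.map (fun ai => if ai = v then c else 0)).sum = (a.count v : Int) * c := by
  induction a with
  | nil => simp
  | cons x t ih =>
    by_cases h : x = v <;> simp [h, ih] <;> ring

-- the heart: A's per-element membership counts sum to B's count-product sum (S nodup)
lemma sum_countP_eq_sum_prod (a b : List Int) (S : List (Int × Int)) (hS : S.Nodup) :
    (a.map (fun ai => (b.countP (fun bi => decide ((ai, bi) ∈ S)) : Int))).sum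
      = (S.map (fun p => (a.count p.1 : Int) * (b.count p.2 : Int))).sum := by
  induction S with
  | nil => simp
  | cons p T ih =>
    rcases List.nodup_cons.mp hS with ⟨hp, hT⟩
    have : ∀ ai : Int, (b.countP (fun bi => decide ((ai, bi) ∈ p :: T)) : Int)
        = (if ai = p.1 then (b.count p.2 : Int) else 0) + (b.countP (fun bi => decide ((ai, bi) ∈ T)) : Int) := by
      intro ai
      rw [countP_mem_cons ai b p T hp, countP_eq_pair]
      split <;> push_cast <;> ring
    simp only [this, List.map_cons, List.sum_cons]
    rw [PySem.List.sum_map_add_int, ih hT, sum_map_ite_count]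

theorem ME_edq_spec : Claim_equal_ME_edq := by
  intro mj mj1 R _
  unfold Spec_ME_edq ME_edq ME_edq_alt
  have hmap : ∀ (l : List (Int × Int)),
      List.map (fun i => (PySem.List.pyGetD l i ((0 : Int), (0 : Int))).2)
        (PySem.List.pyRange 0 (PySem.List.len l)) = l.map Prod.snd := by
    intro l
    rw [show (fun i => (PySem.List.pyGetD l i ((0 : Int), (0 : Int))).2)
          = Prod.snd ∘ (fun i => PySem.List.pyGetD l i ((0 : Int), (0 : Int))) from rfl]
    rw [← List.map_map, PySem.List.map_pyGetD_pyRange_zero]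
  simp only [PySem.List.foldl_append_singleton_eq_map, hmap, List.nil_append]
  -- A side: nested loops → sum of countP
  have hinner : ∀ (ai : Int) (c : Int),
      (mj1.map Prod.snd).foldl (fun count bi => if (ai, bi) ∈ R then count + 1 else count) c
        = c + ((mj1.map Prod.snd).countP (fun bi => decide ((ai, bi) ∈ R)) : Int) := by
    intro ai c
    rw [PySem.List.foldl_ite_add_one]
  calc (mj.map Prod.snd).foldl (fun count ai =>
          (mj1.map Prod.snd).foldl (fun count bi => if (ai, bi) ∈ R then count + 1 else count) count) 0
      = (mj.map Prod.snd).foldl (fun count ai =>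
          count + ((mj1.map Prod.snd).countP (fun bi => decide ((ai, bi) ∈ R)) : Int)) 0 := by
        apply PySem.List.foldl_congr_mem; intro acc x _; exact hinner x acc
    _ = ((mj.map Prod.snd).map (fun ai => ((mj1.map Prod.snd).countP (fun bi => decide ((ai, bi) ∈ R)) : Int))).sum := by
        rw [PySem.List.foldl_add]; simp
    _ = ((PySem.Set.ofList R).map (fun p => ((mj.map Prod.snd).count p.1 : Int) * ((mj1.map Prod.snd).count p.2 : Int))).sum := by
        have hmem : ∀ ai bi : Int, ((ai, bi) ∈ R) ↔ ((ai, bi) ∈ PySem.Set.ofList R) :=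
          fun ai bi => (PySem.Set.mem_ofList R (ai, bi)).symm
        simp only [hmem]
        exact sum_countP_eq_sum_prod _ _ _ (PySem.Set.nodup_ofList R)
    _ = (PySem.Set.ofList R).foldl (fun total p =>
          total + (mj.foldl (fun d p => d.insert p.2 (d.getD p.2 0 + 1)) PySem.Dict.empty).getD p.1 0
                * (mj1.foldl (fun d q => d.insert q.2 (d.getD q.2 0 + 1)) PySem.Dict.empty).getD p.2 0) 0 := by
        have hca : ∀ x : Int,
            (mj.foldl (fun d p => d.insert p.2 (d.getD p.2 0 + 1)) PySem.Dict.empty).getD x 0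
              = ((mj.map Prod.snd).count x : Int) := by
          intro x
          have h := PySem.Dict.getD_foldl_insert_add_one (mj.map Prod.snd) PySem.Dict.empty x
          rw [List.foldl_map] at h
          simpa using h
        have hcb : ∀ x : Int,
            (mj1.foldl (fun d q => d.insert q.2 (d.getD q.2 0 + 1)) PySem.Dict.empty).getD x 0
              = ((mj1.map Prod.snd).count x : Int) := by
          intro x
          have h := PySem.Dict.getD_foldl_insert_add_one (mj1.map Prod.snd) PySem.Dict.empty x
          rw [List.foldl_map] at h
          simpa using h
        rw [PySem.List.foldl_add]
        simp only [hca, hcb, zero_add]
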